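-- pv_equiv track=rewrite | github.com/kauaumnougueira/Gerenciador-de-dados | system/__init__.py | transcriptToDatabase
-- ===== SOURCE A (Python) =====
-- def dataFormattingFilter(action, vector_data):
--     filtred_data = []
--     if action == 'load_from_data_base':
--         for element in vector_data:
--             filtred_data.append(element.replace("\n", ''))
--         return filtred_data
--
--     if action == 'write_in_data_base':
--         for line in vector_data:
--             for element in line:
--                 element += '\n'
--                 filtred_data.append(element)
--         return filtred_data
--
-- def structuralRearrangement(action, data):
--     rearrangement_data = []
--     if action == 'members_data':
--     #PROCESSO DE REARRANJO DA ESTRUTURA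
--         rearrangement_data = [["##MEMBERS_DATA##"]]
--         for member in data:
--             member.insert(0, "#MEMBER#")
--             member.append("########")
--             rearrangement_data.append(member)
--     if action == 'reports_data':
--         rearrangement_data = [["##REPORTS_DATA##"]]
--         for report in data:
--             report.insert(0, "#REPORT#")
--             report.append("########")
--             rearrangement_data.append(report)
--
--     #PROCESSO FINAL
--     rearrangement_data = dataFormattingFilter('write_in_data_base', rearrangement_data)
--     return rearrangement_data
--
-- def transcriptToDatabase(data): #TRANSFORMA TODOS OS ELEMENTOS DO VETOR EM UMA STRING PARA PASSAR PARA O BANCO DE DADOS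
--     members_data = structuralRearrangement('members_data', data[0])
--     reports_data = structuralRearrangement('reports_data', data[1])
--     transcribed_data = ''
--
--     for member in members_data:
--         for infos in member:
--             transcribed_data += f"{infos}"
--
--     for report in reports_data:
--         for infos in report:
--             transcribed_data += f"{infos}"
--
--     return transcribed_data
-- ===== SOURCE B (Python) =====
-- def transcriptToDatabase(data):
--     # single pass: collect line pieces and join once at the end
--     # (preserves A's in-place mutation of each member/report sublist)
--     pieces = ["##MEMBERS_DATA##\n"]
--     for member in data[0]:
--         member.insert(0, "#MEMBER#")
--         member.append("########")
--         for info in member: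
--             pieces.append(info + "\n")
--     pieces.append("##REPORTS_DATA##\n")
--     for report in data[1]:
--         report.insert(0, "#REPORT#")
--         report.append("########")
--         for info in report:
--             pieces.append(info + "\n")
--     return "".join(pieces)
-- ===== Notes on version B (the rewrite author's own statement) =====
-- stated objective: simpler
-- what changed: B inlines A's three-pass pipeline (rearrange each section into a list of lists, reformat it appending newlines, then concatenate character by character) into one pass that collects line pieces per section and joins them once at the end.
import Mathlib
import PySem

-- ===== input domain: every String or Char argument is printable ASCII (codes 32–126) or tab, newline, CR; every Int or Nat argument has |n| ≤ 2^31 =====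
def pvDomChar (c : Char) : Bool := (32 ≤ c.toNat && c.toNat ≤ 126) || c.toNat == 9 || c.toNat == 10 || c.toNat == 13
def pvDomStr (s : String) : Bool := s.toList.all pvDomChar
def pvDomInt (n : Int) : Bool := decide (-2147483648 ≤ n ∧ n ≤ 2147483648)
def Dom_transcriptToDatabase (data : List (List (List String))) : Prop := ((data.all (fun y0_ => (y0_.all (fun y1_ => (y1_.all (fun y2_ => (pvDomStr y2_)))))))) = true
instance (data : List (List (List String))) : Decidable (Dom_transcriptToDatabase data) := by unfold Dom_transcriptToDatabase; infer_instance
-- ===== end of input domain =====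

-- B inlines A's three-pass rearrange/format/concatenate pipeline into one pass that collects line
-- pieces and joins them once (simpler decomposition); the equivalence proved is about the RETURN
-- value (Source B also reproduces A's in-place mutation of each member/report sublist).

-- ===== PORT A =====
-- dataFormattingFilter: only the 'write_in_data_base' branch is reachable from transcriptToDatabase;
-- the 'load_from_data_base' branch takes a differently-typed argument (a flat list of strings) and is
-- dead code here, so only the reachable branch is ported.
def dataFormattingFilter (vector_data : List (List String)) : List String :=
  vector_data.foldl (fun acc line => line.foldl (fun a e => a ++ [e ++ "\n"]) acc) []

def structuralRearrangement (action : String) (data : List (List String)) : List String :=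
  let rearrangement_data : List (List String) := []
  let rearrangement_data :=
    if action == "members_data" then
      -- member.insert(0, "#MEMBER#"); member.append("########"); rearrangement_data.append(member)
      data.foldl (fun acc member => acc ++ [("#MEMBER#" :: (member ++ ["########"]))])
        [["##MEMBERS_DATA##"]]
    else rearrangement_data
  let rearrangement_data :=
    if action == "reports_data" then
      data.foldl (fun acc report => acc ++ [("#REPORT#" :: (report ++ ["########"]))])
        [["##REPORTS_DATA##"]]
    else rearrangement_data
  dataFormattingFilter rearrangement_data

def transcriptToDatabase (data : List (List (List String))) : String :=
  let members_data := structuralRearrangement "members_data" (PySem.List.pyGetD data 0 [])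
  let reports_data := structuralRearrangement "reports_data" (PySem.List.pyGetD data 1 [])
  let transcribed_data : String := ""
  -- for member in members_data: for infos in member: transcribed_data += f"{infos}"
  -- (each 'member' is a string, so the inner loop runs over its characters)
  let transcribed_data :=
    members_data.foldl (fun s m => m.toList.foldl (fun s c => s ++ String.singleton c) s)
      transcribed_data
  reports_data.foldl (fun s m => m.toList.foldl (fun s c => s ++ String.singleton c) s)
    transcribed_data

-- ===== PORT B =====
def transcriptToDatabase_alt (data : List (List (List String))) : String :=
  let pieces : List String := ["##MEMBERS_DATA##\n"]
  let pieces :=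
    (PySem.List.pyGetD data 0 []).foldl
      (fun acc member =>
        ("#MEMBER#" :: (member ++ ["########"])).foldl (fun a info => a ++ [info ++ "\n"]) acc)
      pieces
  let pieces := pieces ++ ["##REPORTS_DATA##\n"]
  let pieces :=
    (PySem.List.pyGetD data 1 []).foldl
      (fun acc report =>
        ("#REPORT#" :: (report ++ ["########"])).foldl (fun a info => a ++ [info ++ "\n"]) acc)
      pieces
  String.join pieces

-- ===== PRECONDITION & SPEC =====
-- Pre_ excludes data with fewer than two elements, on which Python A raises IndexError at data[0]/data[1].
def Pre_transcriptToDatabase (data : List (List (List String))) : Prop := 2 ≤ data.length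
instance (data : List (List (List String))) : Decidable (Pre_transcriptToDatabase data) := by
  unfold Pre_transcriptToDatabase; infer_instance
def pvWitness_transcriptToDatabase : List (List (List String)) := [[["a", "b"], []], [["r"]]]

def Spec_transcriptToDatabase (data : List (List (List String))) (out : String) : Prop := out = transcriptToDatabase_alt data
instance (data : List (List (List String))) (out : String) : Decidable (Spec_transcriptToDatabase data out) := by unfold Spec_transcriptToDatabase; infer_instance

-- ===== CLAIM (what is proved, stated in full; the proofs are below) =====
def Claim_equal_transcriptToDatabase : Prop := ∀ (data : List (List (List String))), Dom_transcriptToDatabase data → Pre_transcriptToDatabase data → Spec_transcriptToDatabase data (transcriptToDatabase data)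

-- ===== LEMMAS AND PROOFS =====

-- Python '+=' over the characters of one string, seen through toList.
theorem charFold_toList (l : List Char) (s : String) :
    (l.foldl (fun s c => s ++ String.singleton c) s).toList = s.toList ++ l := by
  induction l generalizing s with
  | nil => simp
  | cons c t ih => rw [List.foldl_cons, ih]; simp

-- A's outer concatenation loop, seen through toList.
theorem strFold_toList (ms : List String) (s : String) :
    (ms.foldl (fun s m => m.toList.foldl (fun s c => s ++ String.singleton c) s) s).toList
      = s.toList ++ (ms.map String.toList).flatten := by
  induction ms generalizing s with
  | nil => simp
  | cons m t ih => rw [List.foldl_cons, ih, charFold_toList]; simp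

-- A's formatting pass (append '\n' to every element, flattening the list of lines).
theorem formatFold (lines : List (List String)) (acc : List String) :
    lines.foldl (fun acc line => line.foldl (fun a e => a ++ [e ++ "\n"]) acc) acc
      = acc ++ lines.flatMap (fun line => line.map (fun e => e ++ "\n")) := by
  induction lines generalizing acc with
  | nil => simp
  | cons l t ih =>
      rw [List.foldl_cons, ih, PySem.List.foldl_append_singleton_eq_map]
      simp

-- B's per-section loop produces exactly the corresponding flat block of line pieces.
theorem sectionFold (tag : String) (rows : List (List String)) (acc : List String) :
    rows.foldl
        (fun acc m => (tag :: (m ++ ["########"])).foldl (fun a info => a ++ [info ++ "\n"]) acc)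
        acc
      = acc ++ rows.flatMap (fun m => (tag :: (m ++ ["########"])).map (fun e => e ++ "\n")) := by
  induction rows generalizing acc with
  | nil => simp
  | cons m t ih =>
      rw [List.foldl_cons, ih, PySem.List.foldl_append_singleton_eq_map]
      simp

-- Shared shape of A's rearrange-then-format pipeline for one section.
theorem rearr_block (tag hdr : String) (rows : List (List String)) :
    dataFormattingFilter
        (rows.foldl (fun acc m => acc ++ [(tag :: (m ++ ["########"]))]) [[hdr]])
      = (hdr ++ "\n") :: rows.flatMap (fun m => (tag :: (m ++ ["########"])).map (fun e => e ++ "\n")) := by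
  unfold dataFormattingFilter
  rw [PySem.List.foldl_append_singleton_eq_map, formatFold]
  simp [List.flatMap_map]

theorem structuralRearrangement_members (rows : List (List String)) :
    structuralRearrangement "members_data" rows
      = ("##MEMBERS_DATA##" ++ "\n")
          :: rows.flatMap (fun m => ("#MEMBER#" :: (m ++ ["########"])).map (fun e => e ++ "\n")) := by
  simp only [structuralRearrangement]
  rw [if_neg (by decide), if_pos (by decide), rearr_block]

theorem structuralRearrangement_reports (rows : List (List String)) :
    structuralRearrangement "reports_data" rows
      = ("##REPORTS_DATA##" ++ "\n")
          :: rows.flatMap (fun m => ("#REPORT#" :: (m ++ ["########"])).map (fun e => e ++ "\n")) := by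
  simp only [structuralRearrangement]
  rw [if_pos (by decide), rearr_block]

-- ===== VERDICT (by name: the statement is the Claim_ definition above) =====
theorem transcriptToDatabase_spec : Claim_equal_transcriptToDatabase := by
  intro data _ _
  unfold Spec_transcriptToDatabase
  apply String.toList_inj.mp
  simp only [transcriptToDatabase, transcriptToDatabase_alt,
    structuralRearrangement_members, structuralRearrangement_reports,
    sectionFold, strFold_toList, String.toList_join]
  simp
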